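-- pv_equiv track=rewrite | github.com/emliunix/bub | experiments/dsl-parser-tatsu.py | restore_structure
-- ===== SOURCE A (Python) =====
-- def restore_structure(text: str) -> str:
--     """
--     Alternative: Use braces to represent blocks instead of INDENT/DEDENT.
--     This makes the grammar simpler.
--     """
--     lines = text.split("\n")
--     result = []
--     indent_stack = [0]
--
--     for line in lines:
--         stripped = line.lstrip()
--
--         # Skip empty lines and comments
--         if not stripped or stripped.startswith("#"):
--             continue
--
--         indent = len(line) - len(stripped)
--
--         # Handle dedent (close blocks)
--         while indent < indent_stack[-1]:
--             indent_stack.pop()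
--             result.append("}")
--
--         # Handle indent (open new block)
--         if indent > indent_stack[-1]:
--             # Remove the colon from previous line if present
--             if result and result[-1].endswith(":"):
--                 result[-1] = result[-1][:-1]
--             result.append("{")
--             indent_stack.append(indent)
--
--         result.append(stripped)
--
--     # Close remaining blocks
--     while len(indent_stack) > 1:
--         indent_stack.pop()
--         result.append("}")
--
--     return "\n".join(result)
-- ===== SOURCE B (Python) =====
-- def restore_structure(text: str) -> str:
--     """Brace-blocks via a recursive descent over the filtered (indent, line) list."""
--     items = [(len(l) - len(s), s) for l in text.split("\n")
--              if (s := l.lstrip()) and not s.startswith("#")]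
--
--     def go(items, level, out):
--         while items:
--             ind, s = items[0]
--             if ind < level:
--                 return out, items
--             if ind > level:
--                 if out and out[-1].endswith(":"):
--                     out = out[:-1] + [out[-1][:-1]]
--                 out, items = go(items[1:], ind, out + ["{", s])
--                 out = out + ["}"]
--             else:
--                 out = out + [s]
--                 items = items[1:]
--         return out, items
--
--     out, _ = go(items, 0, [])
--     return "\n".join(out)
-- ===== Notes on version B (the rewrite author's own statement) =====
-- stated objective: alternative
-- what changed: A's single imperative pass with an explicit indent stack and in-place mutation of the result list is replaced by first filtering the text to (indent, stripped) pairs and then running a recursive-descent parser whose call frames play the role of the stack, closing braces as recursion unwinds.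
import Mathlib
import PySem

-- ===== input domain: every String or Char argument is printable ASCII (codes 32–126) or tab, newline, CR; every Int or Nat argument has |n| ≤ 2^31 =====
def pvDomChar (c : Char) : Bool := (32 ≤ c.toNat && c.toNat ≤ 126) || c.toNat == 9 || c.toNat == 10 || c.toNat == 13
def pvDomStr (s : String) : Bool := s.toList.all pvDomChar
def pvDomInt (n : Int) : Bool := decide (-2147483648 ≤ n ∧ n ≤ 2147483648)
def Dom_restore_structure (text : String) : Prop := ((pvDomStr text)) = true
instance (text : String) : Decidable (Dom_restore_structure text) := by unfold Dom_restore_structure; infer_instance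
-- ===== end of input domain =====

-- B replaces A's mutable result/indent-stack loop by a filtered (indent, line) list
-- consumed by a recursive descent parser (objective: alternative decomposition).


-- ===== PORT A =====
-- the 'while indent < indent_stack[-1]: pop; append "}"' loop
-- (the stack never empties in A's run: 0 stays at the bottom and 0 ≤ indent)
def rsPops (res : List (List Char)) (stack : List Nat) (ind : Nat) :
    List (List Char) × List Nat :=
  match stack with
  | [] => (res, [])
  | top :: tl => if ind < top then rsPops (res ++ [['}']]) tl ind else (res, top :: tl)

-- A's loop body after the skip test, on (indent, stripped)
def rsStepI (st : List (List Char) × List Nat) (item : Nat × List Char) :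
    List (List Char) × List Nat :=
  let r := rsPops st.1 st.2 item.1
  if item.1 > r.2.headD 0 then
    (((match r.1.getLast? with
       | some last =>
           if PySem.Chars.endswith last [':'] then r.1.dropLast ++ [last.dropLast] else r.1
       | none => r.1) ++ [['{']]) ++ [item.2], item.1 :: r.2)
  else (r.1 ++ [item.2], r.2)

-- one iteration of 'for line in lines'
def rsStepA (st : List (List Char) × List Nat) (line : List Char) :
    List (List Char) × List Nat :=
  let stripped := PySem.Chars.lstrip line
  if stripped = [] || PySem.Chars.startswith stripped ['#'] then st
  else rsStepI st (line.length - stripped.length, stripped)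

-- the trailing 'while len(indent_stack) > 1: pop; append "}"'
def rsCloseAll (res : List (List Char)) (stack : List Nat) : List (List Char) :=
  match stack with
  | _ :: t :: ts => rsCloseAll (res ++ [['}']]) (t :: ts)
  | _ => res

def restore_structure (text : String) : String :=
  let lines := PySem.Chars.splitOn text.toList ['\n']
  let st := lines.foldl rsStepA ([], [0])
  String.ofList (PySem.Chars.join ['\n'] (rsCloseAll st.1 st.2))

-- ===== PORT B =====
-- the comprehension filtering to (indent, stripped) items
def rsItem? (line : List Char) : Option (Nat × List Char) :=
  let s := PySem.Chars.lstrip line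
  if s = [] || PySem.Chars.startswith s ['#'] then none
  else some (line.length - s.length, s)

-- Source B's recursive 'go'; the fuel (items.length + 1 always suffices, see the proofs)
-- only makes the recursion total and changes nothing on any reachable call
def rsGo (fuel : Nat) (its : List (Nat × List Char)) (level : Nat)
    (out : List (List Char)) : List (List Char) × List (Nat × List Char) :=
  match fuel with
  | 0 => (out, its)
  | f + 1 =>
    match its with
    | [] => (out, [])
    | (ind, s) :: rest =>
      if ind < level then (out, its)
      else if ind > level then
        let out1 := (match out.getLast? with
          | some last =>
              if PySem.Chars.endswith last [':'] then out.dropLast ++ [last.dropLast] else out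
          | none => out) ++ [['{'], s]
        let r := rsGo f rest ind out1
        rsGo f r.2 level (r.1 ++ [['}']])
      else rsGo f rest level (out ++ [s])

def restore_structure_alt (text : String) : String :=
  let items := (PySem.Chars.splitOn text.toList ['\n']).filterMap rsItem?
  String.ofList (PySem.Chars.join ['\n'] (rsGo (items.length + 1) items 0 []).1)

-- ===== PRECONDITION & SPEC =====
def Spec_restore_structure (text : String) (out : String) : Prop := out = restore_structure_alt text
instance (text : String) (out : String) : Decidable (Spec_restore_structure text out) := by unfold Spec_restore_structure; infer_instance

-- ===== CLAIM (what is proved, stated in full; the proofs are below) =====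
def Claim_equal_restore_structure : Prop := ∀ (text : String), Dom_restore_structure text → Spec_restore_structure text (restore_structure text)

-- ===== LEMMAS AND PROOFS =====

-- the remainder rsGo returns is never longer than its input item list
theorem rsGo_rem_length_le (fuel : Nat) :
    ∀ (its : List (Nat × List Char)) (level : Nat) (out : List (List Char)),
      (rsGo fuel its level out).2.length ≤ its.length := by
  induction fuel with
  | zero => intro its level out; simp [rsGo]
  | succ f ih =>
    intro its level out
    match its with
    | [] => simp [rsGo]
    | (ind, s) :: rest =>
      by_cases h1 : ind < level
      · simp [rsGo, h1]
      · by_cases h2 : ind > level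
        · have hgo : rsGo (f + 1) ((ind, s) :: rest) level out =
              rsGo f (rsGo f rest ind ((match out.getLast? with
                | some last =>
                    if PySem.Chars.endswith last [':'] then out.dropLast ++ [last.dropLast] else out
                | none => out) ++ [['{'], s])).2 level
                ((rsGo f rest ind ((match out.getLast? with
                  | some last =>
                      if PySem.Chars.endswith last [':'] then out.dropLast ++ [last.dropLast] else out
                  | none => out) ++ [['{'], s])).1 ++ [['}']]) := by
            simp [rsGo, h1, h2]
          rw [hgo]
          exact le_trans (le_trans (ih _ _ _) (ih _ _ _)) (by simp)
        · have hgo : rsGo (f + 1) ((ind, s) :: rest) level out =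
              rsGo f rest level (out ++ [s]) := by simp [rsGo, h1, h2]
          rw [hgo]
          exact le_trans (ih _ _ _) (by simp)

-- fold A over the raw lines = fold the per-item step over the filtered items
theorem foldA_eq_foldI (lines : List (List Char)) :
    ∀ st, lines.foldl rsStepA st = (lines.filterMap rsItem?).foldl rsStepI st := by
  induction lines with
  | nil => intro st; rfl
  | cons line ls ih =>
    intro st
    by_cases h : PySem.Chars.lstrip line = [] ∨ PySem.Chars.startswith (PySem.Chars.lstrip line) ['#'] = true
    · have h1 : rsStepA st line = st := by
        simp only [rsStepA]; rw [if_pos (by simpa using h)]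
      have h2 : rsItem? line = none := by
        simp only [rsItem?]; rw [if_pos (by simpa using h)]
      simp [List.foldl, h1, h2, ih]
    · push Not at h
      have hb : (PySem.Chars.lstrip line = [] || PySem.Chars.startswith (PySem.Chars.lstrip line) ['#']) = false := by
        simp [h.1, h.2]
      have h1 : rsStepA st line = rsStepI st (line.length - (PySem.Chars.lstrip line).length, PySem.Chars.lstrip line) := by
        simp only [rsStepA]; rw [if_neg (by simp [hb])]
      have h2 : rsItem? line = some (line.length - (PySem.Chars.lstrip line).length, PySem.Chars.lstrip line) := by
        simp only [rsItem?]; rw [if_neg (by simp [hb])]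
      simp [List.foldl, h1, h2, ih]

-- A's whole pipeline after filtering, as one function of (items, out, stack)
def rsA (its : List (Nat × List Char)) (out : List (List Char)) (stack : List Nat) :
    List (List Char) :=
  rsCloseAll (its.foldl rsStepI (out, stack)).1 (its.foldl rsStepI (out, stack)).2

-- MAIN INVARIANT: running A's fold-and-close from stack (level :: tail) equals
-- running B's recursive frame at 'level' and letting the outer frames (tail) finish.
theorem rsMain (fuel : Nat) :
    ∀ (its : List (Nat × List Char)) (level : Nat) (tail : List Nat)
      (out : List (List Char)),
      its.length < fuel → (tail = [] → level = 0) →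
      rsA its out (level :: tail) =
        (match tail with
         | [] => (rsGo fuel its level out).1
         | t :: ts => rsA (rsGo fuel its level out).2
             ((rsGo fuel its level out).1 ++ [['}']]) (t :: ts)) := by
  induction fuel with
  | zero => intro its level tail out h _; omega
  | succ f ih =>
    intro its level tail out hlen htail
    match its with
    | [] =>
      cases tail with
      | nil => simp [rsGo, rsA, List.foldl, rsCloseAll]
      | cons t ts => simp [rsGo, rsA, List.foldl, rsCloseAll]
    | (ind, s) :: rest =>
      rcases Nat.lt_trichotomy ind level with hlt | heq | hgt
      · -- dedent out of this frame: A pops once and retries the same item with 'tail'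
        cases tail with
        | nil => exact absurd hlt (by simp [htail rfl])
        | cons t ts =>
          have hpop : rsPops out (level :: t :: ts) ind = rsPops (out ++ [['}']]) (t :: ts) ind := by
            simp [rsPops, hlt]
          have hstep : rsStepI (out, level :: t :: ts) (ind, s) =
              rsStepI (out ++ [['}']], t :: ts) (ind, s) := by
            simp only [rsStepI]; rw [hpop]
          have hgo : rsGo (f + 1) ((ind, s) :: rest) level out = (out, (ind, s) :: rest) := by
            simp [rsGo, hlt]
          rw [hgo]
          simp only [rsA, List.foldl, hstep]
      · -- same level: emit the line, continue in the same frame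
        subst heq
        have hgo : rsGo (f + 1) ((ind, s) :: rest) ind out = rsGo f rest ind (out ++ [s]) := by
          simp [rsGo]
        have hstep : rsStepI (out, ind :: tail) (ind, s) = (out ++ [s], ind :: tail) := by
          simp [rsStepI, rsPops]
        have hA : rsA ((ind, s) :: rest) out (ind :: tail) = rsA rest (out ++ [s]) (ind :: tail) := by
          simp only [rsA, List.foldl, hstep]
        rw [hgo, hA]
        exact ih rest ind tail (out ++ [s]) (by simpa using Nat.lt_of_succ_lt_succ hlen) htail
      · -- deeper indent: open a block (colon-strip, '{', the line), recurse, close with '}'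
        have h1 : ¬ ind < level := by omega
        have hpops : rsPops out (level :: tail) ind = (out, level :: tail) := by
          simp [rsPops, h1]
        have hout1 :
            rsStepI (out, level :: tail) (ind, s) =
              ((match out.getLast? with
                | some last =>
                    if PySem.Chars.endswith last [':'] then out.dropLast ++ [last.dropLast] else out
                | none => out) ++ [['{'], s], ind :: level :: tail) := by
          simp only [rsStepI, hpops]
          rw [if_pos (by simpa using hgt)]
          simp
        have hgo : rsGo (f + 1) ((ind, s) :: rest) level out =
            rsGo f (rsGo f rest ind ((match out.getLast? with
              | some last =>
                  if PySem.Chars.endswith last [':'] then out.dropLast ++ [last.dropLast] else out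
              | none => out) ++ [['{'], s])).2 level
              ((rsGo f rest ind ((match out.getLast? with
                | some last =>
                    if PySem.Chars.endswith last [':'] then out.dropLast ++ [last.dropLast] else out
                | none => out) ++ [['{'], s])).1 ++ [['}']]) := by
          simp [rsGo, h1, hgt]
        have hlen1 : rest.length < f := by simpa using Nat.lt_of_succ_lt_succ hlen
        have hA : rsA ((ind, s) :: rest) out (level :: tail) =
            rsA rest ((match out.getLast? with
              | some last =>
                  if PySem.Chars.endswith last [':'] then out.dropLast ++ [last.dropLast] else out
              | none => out) ++ [['{'], s]) (ind :: level :: tail) := by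
          simp only [rsA, List.foldl, hout1]
        have step1 := ih rest ind (level :: tail)
          ((match out.getLast? with
            | some last =>
                if PySem.Chars.endswith last [':'] then out.dropLast ++ [last.dropLast] else out
            | none => out) ++ [['{'], s]) hlen1 (by intro h; cases h)
        have hlen2 : (rsGo f rest ind ((match out.getLast? with
            | some last =>
                if PySem.Chars.endswith last [':'] then out.dropLast ++ [last.dropLast] else out
            | none => out) ++ [['{'], s])).2.length < f :=
          lt_of_le_of_lt (rsGo_rem_length_le f rest ind _) hlen1
        have step2 := ih (rsGo f rest ind ((match out.getLast? with
            | some last =>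
                if PySem.Chars.endswith last [':'] then out.dropLast ++ [last.dropLast] else out
            | none => out) ++ [['{'], s])).2 level tail
          ((rsGo f rest ind ((match out.getLast? with
            | some last =>
                if PySem.Chars.endswith last [':'] then out.dropLast ++ [last.dropLast] else out
            | none => out) ++ [['{'], s])).1 ++ [['}']]) hlen2 htail
        rw [hgo, hA, step1]
        exact step2

-- ===== VERDICT (by name: the statement is the Claim_ definition above) =====
theorem restore_structure_spec : Claim_equal_restore_structure := by
  intro text _
  unfold Spec_restore_structure restore_structure restore_structure_alt
  have hfold := foldA_eq_foldI (PySem.Chars.splitOn text.toList ['\n']) ([], [0])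
  have hmain := rsMain (((PySem.Chars.splitOn text.toList ['\n']).filterMap rsItem?).length + 1)
    ((PySem.Chars.splitOn text.toList ['\n']).filterMap rsItem?) 0 [] [] (by omega) (fun _ => rfl)
  simp only [rsA] at hmain
  simp only [hfold, hmain]
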